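-- pv_equiv track=rewrite | github.com/lucaspfdr/HackerRankProblems | PlayerScore.py | numPlayers
-- ===== SOURCE A (Python) =====
-- def numPlayers(k, scores):
--     scores.sort(reverse=True)
--     rank = 1
--     num_players = 0
--     last_score = None
--     players_rank = 1
--
--     for score in scores:
--         if score == 0:
--             break
--         if score != last_score:
--             players_rank = rank
--         if players_rank <= k:
--             num_players += 1
--         last_score = score
--         rank += 1
--
--     return num_players
-- ===== SOURCE B (Python) =====
-- def numPlayers(k, scores):
--     # Group the sorted scores into a counts dict (insertion order = descending
--     # distinct values) and walk the groups once with a cumulative offset.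
--     scores.sort(reverse=True)
--     counts = {}
--     for s in scores:
--         counts[s] = counts.get(s, 0) + 1
--     total = 0
--     offset = 0
--     for value, cnt in counts.items():
--         if value == 0:
--             break
--         if offset + 1 <= k:
--             total += cnt
--         offset += cnt
--     return total
-- ===== Notes on version B (the rewrite author's own statement) =====
-- stated objective: alternative
-- what changed: A's element-by-element pass tracking rank/last_score/players_rank is replaced by building a counts dict of the sorted scores and walking the distinct values once, adding each group's whole count when its cumulative offset+1 is at most k and breaking at value 0.
import Mathlib
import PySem

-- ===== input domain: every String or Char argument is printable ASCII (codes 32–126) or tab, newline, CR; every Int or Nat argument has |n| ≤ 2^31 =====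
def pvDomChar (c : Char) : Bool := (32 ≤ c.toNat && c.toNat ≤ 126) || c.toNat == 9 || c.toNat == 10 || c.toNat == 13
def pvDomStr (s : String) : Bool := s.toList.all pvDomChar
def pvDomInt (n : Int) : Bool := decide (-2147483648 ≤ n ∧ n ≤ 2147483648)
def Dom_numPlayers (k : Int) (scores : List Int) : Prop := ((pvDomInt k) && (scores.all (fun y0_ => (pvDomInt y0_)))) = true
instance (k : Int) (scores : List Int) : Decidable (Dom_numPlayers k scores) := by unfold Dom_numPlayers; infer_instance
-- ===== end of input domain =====

-- B replaces A's per-element rank/last-score/players_rank loop by grouping the sorted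
-- scores into a counts dict and walking the distinct values once with a cumulative offset
-- (objective: alternative decomposition); both Pythons sort `scores` in place identically.

-- ===== PORT A =====
-- A's for-loop; `break` is modelled by returning the accumulator
def numPlayersLoop (k : Int) : List Int → Int → Int → Option Int → Int → Int
  | [], _, num, _, _ => num
  | s :: rest, rank, num, last, pr =>
    if s = 0 then num
    else
      let pr' := if some s ≠ last then rank else pr
      let num' := if pr' ≤ k then num + 1 else num
      numPlayersLoop k rest (rank + 1) num' (some s) pr'

def numPlayers (k : Int) (scores : List Int) : Int :=
  numPlayersLoop k (PySem.List.sorted scores (fun x => x) true) 1 0 none 1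

-- ===== PORT B =====
-- B's for-loop over the dict items; `break` is modelled by returning the accumulator
def numPlayersAltLoop (k : Int) : List (Int × Int) → Int → Int → Int
  | [], _, total => total
  | (value, cnt) :: rest, offset, total =>
    if value = 0 then total
    else numPlayersAltLoop k rest (offset + cnt)
           (if offset + 1 ≤ k then total + cnt else total)

def numPlayers_alt (k : Int) (scores : List Int) : Int :=
  let counts := (PySem.List.sorted scores (fun x => x) true).foldl
      (fun d s => d.insert s (d.getD s 0 + 1)) PySem.Dict.empty
  numPlayersAltLoop k counts.items 0 0

-- ===== PRECONDITION & SPEC =====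
def Spec_numPlayers (k : Int) (scores : List Int) (out : Int) : Prop := out = numPlayers_alt k scores
instance (k : Int) (scores : List Int) (out : Int) : Decidable (Spec_numPlayers k scores out) := by unfold Spec_numPlayers; infer_instance

-- ===== CLAIM (what is proved, stated in full; the proofs are below) =====
def Claim_equal_numPlayers : Prop := ∀ (k : Int) (scores : List Int), Dom_numPlayers k scores → Spec_numPlayers k scores (numPlayers k scores)

-- ===== LEMMAS AND PROOFS =====

-- the predicate both loops are shown to count: s is reached before the zero
-- cut-off and its competition rank (strictly-greater count + 1) is at most k
def pvPred (t : List Int) (k s : Int) : Bool :=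
  (decide (0 < s) || (decide (s < 0) && !(t.contains 0))) &&
    decide (((t.countP (fun y => decide (s < y)) : Int)) < k)

-- A-side loop invariant: walking A's loop over the remaining suffix l₂ of the
-- sorted descending list t equals the accumulator plus the pvPred-count over l₂.
lemma numPlayersLoop_eq (k : Int) (t : List Int) (ht : t.Pairwise (fun a b => b ≤ a)) :
    ∀ (l₂ l₁ : List Int) (num : Int) (last : Option Int) (pr : Int),
    t = l₁ ++ l₂ → (0 : Int) ∉ l₁ →
    ((last = none ∧ l₁ = []) ∨
      (∃ m, last = some m ∧ m ∈ l₁ ∧ (∀ x ∈ l₁, m ≤ x) ∧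
        pr = (t.countP (fun y => decide (m < y)) : Int) + 1)) →
    numPlayersLoop k l₂ ((l₁.length : Int) + 1) num last pr
      = num + (l₂.countP (pvPred t k) : Int) := by
  intro l₂
  induction l₂ with
  | nil => intro l₁ num last pr _ _ _; simp [numPlayersLoop]
  | cons s rest ih =>
    intro l₁ num last pr ht' h0 hlast
    have hpw : (l₁ ++ s :: rest).Pairwise (fun a b => b ≤ a) := ht' ▸ ht
    rw [List.pairwise_append] at hpw
    have hrest_le : ∀ y ∈ rest, y ≤ s := fun y hy => (List.pairwise_cons.mp hpw.2.1).1 y hy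
    have hl1_ge : ∀ x ∈ l₁, s ≤ x := fun x hx => hpw.2.2 x hx s (by simp)
    by_cases hs0 : s = 0
    · -- break: everything from here on fails pvPred too
      subst hs0
      have hmem : (0:Int) ∈ t := by rw [ht']; simp
      simp [numPlayersLoop, pvPred]
      intro a ha h
      rcases h with h | ⟨h1, h2⟩
      · have := hrest_le a ha; omega
      · exact absurd hmem h2
    · -- step
      have hrest_cnt : (s :: rest).countP (fun y => decide (s < y)) = 0 := by
        rw [List.countP_eq_zero]
        intro a ha
        rcases List.mem_cons.mp ha with h | h
        · simp [h]
        · have := hrest_le a h; simp; omega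
      have hpr' : (if some s ≠ last then ((l₁.length : Int) + 1) else pr)
          = (t.countP (fun y => decide (s < y)) : Int) + 1 := by
        rcases hlast with ⟨hn, hl1⟩ | ⟨m, hm_eq, hm_mem, hm_le, hpr⟩
        · subst hl1
          rw [if_pos (by simp [hn])]
          rw [ht']
          simp [hrest_cnt]
        · by_cases hsm : s = m
          · rw [if_neg (by simp [hm_eq, hsm])]
            rw [hpr, hsm]
          · rw [if_pos (by simp [hm_eq, hsm])]
            have hl1_cnt : l₁.countP (fun y => decide (s < y)) = l₁.length := by
              rw [List.countP_eq_length]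
              intro x hx
              have h1 := hl1_ge x hx
              have h2 := hm_le x hx
              have h3 := hl1_ge m hm_mem
              simp
              omega
            rw [ht', List.countP_append, hl1_cnt, hrest_cnt]
            simp
      have hzero : (decide (0 < s) || (decide (s < 0) && !(t.contains 0))) = true := by
        rcases lt_trichotomy s 0 with h | h | h
        · have hnot : (0:Int) ∉ t := by
            rw [ht']
            intro hmem
            rcases List.mem_append.mp hmem with hm | hm
            · exact h0 hm
            · rcases List.mem_cons.mp hm with hm' | hm'
              · omega
              · have := hrest_le 0 hm'; omega
          simp [h, hnot]
        · exact absurd h hs0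
        · simp [h]
      -- unfold one loop step and apply the induction hypothesis
      rw [show numPlayersLoop k (s :: rest) ((l₁.length : Int) + 1) num last pr
          = numPlayersLoop k rest ((l₁.length : Int) + 1 + 1)
              (if (if some s ≠ last then ((l₁.length : Int) + 1) else pr) ≤ k then num + 1 else num)
              (some s)
              (if some s ≠ last then ((l₁.length : Int) + 1) else pr) from by
        simp [numPlayersLoop, hs0]]
      have hih := ih (l₁ ++ [s])
        (if (if some s ≠ last then ((l₁.length : Int) + 1) else pr) ≤ k then num + 1 else num)
        (some s) (if some s ≠ last then ((l₁.length : Int) + 1) else pr)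
        (by rw [ht']; simp)
        (by simp [h0]; omega)
        (Or.inr ⟨s, rfl, by simp, by
          intro x hx
          rcases List.mem_append.mp hx with h | h
          · exact hl1_ge x h
          · simp at h; omega, hpr'⟩)
      have hlen : ((l₁ ++ [s]).length : Int) + 1 = (l₁.length : Int) + 1 + 1 := by
        simp
      rw [hlen] at hih
      rw [hih]
      rw [List.countP_cons]
      have hps : pvPred t k s = decide (((t.countP (fun y => decide (s < y)) : Int)) < k) := by
        rw [pvPred, hzero]; simp
      rw [hps, hpr']
      by_cases hk : ((t.countP (fun y => decide (s < y)) : Int)) < k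
      · rw [if_pos (by omega), if_pos (by simpa using hk)]
        push_cast; ring
      · rw [if_neg (by omega), if_neg (by simpa using hk)]
        push_cast; ring

-- set(t) of a descending list is strictly descending
lemma ofList_pairwise_gt : ∀ t : List Int, t.Pairwise (fun a b => b ≤ a) →
    (PySem.Set.ofList t).Pairwise (fun a b => b < a) := by
  intro t
  induction t with
  | nil => intro _; simp [PySem.Set.ofList, PySem.Set.empty]
  | cons x xs ih =>
    intro ht
    rcases List.pairwise_cons.mp ht with ⟨hx, hxs⟩
    rw [PySem.Set.ofList_cons]
    refine List.pairwise_cons.mpr ⟨?_, ?_⟩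
    · intro y hy
      rcases (PySem.Set.mem_discard _ _ _).mp hy with ⟨hy1, hy2⟩
      have := hx y ((PySem.Set.mem_ofList _ _).mp hy1)
      omega
    · exact List.Pairwise.sublist List.filter_sublist (ih hxs)

-- count a predicate as a disjoint sum of two predicates
lemma countP_split_int (l : List Int) (p q r : Int → Bool)
    (h : ∀ y ∈ l, (p y = (q y || r y)) ∧ ¬(q y = true ∧ r y = true)) :
    l.countP p = l.countP q + l.countP r := by
  induction l with
  | nil => simp
  | cons a l ih =>
    rcases h a (by simp) with ⟨hpa, hd⟩
    have ih' := ih (fun y hy => h y (by simp [hy]))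
    by_cases hq : q a = true
    · by_cases hr : r a = true
      · exact absurd ⟨hq, hr⟩ hd
      · have hr' : r a = false := by simpa using hr
        have hp : p a = true := by rw [hpa, hq]; simp
        simp [ih', hp, hq, hr']
        omega
    · have hq' : q a = false := by simpa using hq
      by_cases hr : r a = true
      · have hp : p a = true := by rw [hpa, hq', hr]; simp
        simp [ih', hp, hq', hr]
        omega
      · have hr' : r a = false := by simpa using hr
        have hp : p a = false := by rw [hpa, hq', hr']; simp
        simp [ih', hp, hq', hr']

-- B-side loop invariant: walking B's loop over the remaining distinct values vs₂
-- (with their counts), at offset = number of elements of t not in vs₂, equals the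
-- accumulator plus the pvPred-count over the elements of t whose value is in vs₂.
lemma numPlayersAltLoop_eq (k : Int) (t : List Int) (ht : t.Pairwise (fun a b => b ≤ a)) :
    ∀ (vs₂ vs₁ : List Int) (total : Int),
    PySem.Set.ofList t = vs₁ ++ vs₂ → (0 : Int) ∉ vs₁ →
    numPlayersAltLoop k (vs₂.map (fun v => (v, (t.count v : Int))))
        ((t.countP (fun y => !(vs₂.contains y)) : Int)) total
      = total + (t.countP (fun s => pvPred t k s && vs₂.contains s) : Int) := by
  intro vs₂
  induction vs₂ with
  | nil => intro vs₁ total _ _; simp [numPlayersAltLoop]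
  | cons v rest ih =>
    intro vs₁ total hofl h0
    have hnd : (vs₁ ++ v :: rest).Nodup := hofl ▸ PySem.Set.nodup_ofList t
    have hgt : (vs₁ ++ v :: rest).Pairwise (fun a b => b < a) := hofl ▸ ofList_pairwise_gt t ht
    rw [List.pairwise_append] at hgt
    have hrest_lt : ∀ y ∈ rest, y < v := fun y hy => (List.pairwise_cons.mp hgt.2.1).1 y hy
    have hvs1_gt : ∀ x ∈ vs₁, v < x := fun x hx => hgt.2.2 x hx v (by simp)
    have hvnr : v ∉ rest := fun hc => by have := hrest_lt v hc; omega
    have hmem_t : ∀ y, y ∈ t ↔ y ∈ vs₁ ++ v :: rest := fun y => by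
      rw [← hofl]; exact (PySem.Set.mem_ofList _ _).symm
    by_cases hv0 : v = 0
    · -- break: every element of t with value in v :: rest fails pvPred
      subst hv0
      have hmem : (0:Int) ∈ t := (hmem_t 0).mpr (by simp)
      rw [show ((0:Int) :: rest).map (fun v => (v, (t.count v : Int)))
          = ((0:Int), (t.count 0 : Int)) :: rest.map (fun v => (v, (t.count v : Int))) from rfl]
      rw [show numPlayersAltLoop k (((0:Int), (t.count 0 : Int)) :: rest.map (fun v => (v, (t.count v : Int))))
            ((t.countP (fun y => !(((0:Int) :: rest).contains y)) : Int)) total = total from rfl]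
      have hcz : t.contains (0:Int) = true := by simpa using hmem
      have hz : t.countP (fun s => pvPred t k s && ((0:Int) :: rest).contains s) = 0 := by
        rw [List.countP_eq_zero]
        intro a _
        by_cases hc : a ∈ (0:Int) :: rest
        · have ha_le : a ≤ 0 := by
            rcases List.mem_cons.mp hc with h | h
            · omega
            · have := hrest_lt a h; omega
          have hff : pvPred t k a = false := by
            rw [pvPred, hcz]
            have hda : decide ((0:Int) < a) = false := by simp; omega
            rw [hda]
            simp
          simp [hff]
        · simp
          intro _
          simpa using hc
      rw [hz]
      simp
    · -- step
      have hoff : (t.countP (fun y => !((v :: rest).contains y)) : Int)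
          = (t.countP (fun y => decide (v < y)) : Int) := by
        congr 1
        apply List.countP_congr
        intro y hy
        rcases List.mem_append.mp ((hmem_t y).mp hy) with h | h
        · have h1 := hvs1_gt y h
          have h2 : y ∉ v :: rest := (List.disjoint_of_nodup_append hnd) h
          simp [h2]
          omega
        · rcases List.mem_cons.mp h with h' | h'
          · subst h'; simp
          · have := hrest_lt y h'
            simp [h']
            omega
      have hoff' : (t.countP (fun y => !((v :: rest).contains y)) : Int) + (t.count v : Int)
          = (t.countP (fun y => !(rest.contains y)) : Int) := by
        have := countP_split_int t (fun y => !(rest.contains y))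
          (fun y => !((v :: rest).contains y)) (fun y => y == v)
          (fun y _ => by
            constructor
            · by_cases hyv : y = v
              · subst hyv; simp [hvnr]
              · simp [hyv]
            · intro ⟨h1, h2⟩
              have : y = v := by simpa using h2
              subst this
              simp at h1)
        rw [this]
        have : t.countP (fun y => y == v) = t.count v := rfl
        rw [this]
        push_cast
        ring
      have hfirst : (decide (0 < v) || (decide (v < 0) && !(t.contains 0))) = true := by
        rcases lt_trichotomy v 0 with h | h | h
        · have hnot : (0:Int) ∉ t := by
            intro hc
            rcases List.mem_append.mp ((hmem_t 0).mp hc) with hm | hm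
            · exact h0 hm
            · rcases List.mem_cons.mp hm with hm' | hm'
              · omega
              · have := hrest_lt 0 hm'; omega
          simp [h, hnot]
        · exact absurd h hv0
        · simp [h]
      have hpv : pvPred t k v = decide (((t.countP (fun y => decide (v < y)) : Int)) < k) := by
        rw [pvPred, hfirst]; simp
      have hsplit : t.countP (fun s => pvPred t k s && (v :: rest).contains s)
          = t.countP (fun s => pvPred t k s && rest.contains s)
            + (if pvPred t k v = true then t.count v else 0) := by
        by_cases hp : pvPred t k v = true
        · rw [if_pos hp]
          apply countP_split_int t _ _ (fun y => y == v)
          intro y _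
          constructor
          · by_cases hyv : y = v
            · subst hyv; simp [hvnr, hp]
            · simp [hyv]
          · intro ⟨h1, h2⟩
            have : y = v := by simpa using h2
            subst this
            simp [hvnr] at h1
          -- countP (· == v) = count v
        · rw [if_neg hp]
          apply List.countP_congr
          intro y _
          by_cases hyv : y = v
          · subst hyv
            simp [Bool.eq_false_iff.mpr hp, hvnr]
          · simp [hyv]
      -- unfold one loop step
      rw [show ((v :: rest).map (fun v => (v, (t.count v : Int))))
          = (v, (t.count v : Int)) :: rest.map (fun v => (v, (t.count v : Int))) from rfl]
      rw [show numPlayersAltLoop k ((v, (t.count v : Int)) :: rest.map (fun v => (v, (t.count v : Int))))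
            ((t.countP (fun y => !((v :: rest).contains y)) : Int)) total
          = numPlayersAltLoop k (rest.map (fun v => (v, (t.count v : Int))))
              ((t.countP (fun y => !((v :: rest).contains y)) : Int) + (t.count v : Int))
              (if (t.countP (fun y => !((v :: rest).contains y)) : Int) + 1 ≤ k
                then total + (t.count v : Int) else total) from by
        simp [numPlayersAltLoop, hv0]]
      rw [hoff']
      rw [ih (vs₁ ++ [v])
        (if (t.countP (fun y => !((v :: rest).contains y)) : Int) + 1 ≤ k
          then total + (t.count v : Int) else total)
        (by rw [hofl]; simp)
        (by simp [h0]; omega)]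
      rw [hsplit]
      by_cases hk : ((t.countP (fun y => decide (v < y)) : Int)) < k
      · rw [if_pos (by rw [hoff]; omega), if_pos (by rw [hpv]; simpa using hk)]
        push_cast; ring
      · rw [if_neg (by rw [hoff]; omega), if_neg (by rw [hpv]; simpa using hk)]
        push_cast; ring

-- both closed forms agree: counting over the values in set(t) is counting over t
lemma countP_contains_ofList (t : List Int) (p : Int → Bool) :
    t.countP (fun s => p s && List.contains (PySem.Set.ofList t) s) = t.countP p := by
  apply List.countP_congr
  intro y hy
  have hmem : y ∈ PySem.Set.ofList t := (PySem.Set.mem_ofList _ _).mpr hy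
  simp [hmem]

-- ===== VERDICT (by name: the statement is the Claim_ definition above) =====
theorem numPlayers_spec : Claim_equal_numPlayers := by
  intro k scores _
  unfold Spec_numPlayers numPlayers numPlayers_alt
  have hpw := PySem.List.sorted_pairwise_rev (xs := scores) (key := fun x : Int => x)
  set t := PySem.List.sorted scores (fun x => x) true with hts
  -- A side
  have hA := numPlayersLoop_eq k t hpw t [] 0 none 1 (by simp) (by simp) (Or.inl ⟨rfl, rfl⟩)
  simp only [List.length_nil, Int.natCast_zero, zero_add] at hA
  -- B side: the counts loop is Counter(t), whose items are set(t) with multiplicities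
  have h0 : t.countP (fun y => !(List.contains (PySem.Set.ofList t) y)) = 0 := by
    rw [List.countP_eq_zero]
    intro a ha
    simpa using (PySem.Set.mem_ofList _ _).mpr ha
  have hB := numPlayersAltLoop_eq k t hpw (PySem.Set.ofList t) [] 0 (by simp) (by simp)
  rw [h0] at hB
  simp only [Int.natCast_zero, zero_add] at hB
  show numPlayersLoop k t 1 0 none 1
      = numPlayersAltLoop k ((t.foldl (fun d s => d.insert s (d.getD s 0 + 1)) PySem.Dict.empty).items) 0 0
  simp only [PySem.Dict.foldl_insert_getD_add_one_eq_counter, PySem.Dict.items_counter]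
  rw [hA, hB, countP_contains_ofList]
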